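-- pv_equiv track=rewrite | github.com/ariuk44/retake_exam_prep | day_24.py | isZeroLimited
-- ===== SOURCE A (Python) =====
-- def isZeroLimited(arr):
--     for i in range(len(arr)):
--         if i % 3 == 1:
--             if arr[i] != 0:
--                 return 0
--         else:
--             if arr[i] == 0:
--                 return 0
--     return 1
-- ===== SOURCE B (Python) =====
-- def isZeroLimited(arr):
--     it = iter(arr)
--     for x in it:
--         if x == 0:
--             return 0
--         y = next(it, None)
--         if y is not None and y != 0:
--             return 0
--         z = next(it, 1)
--         if z == 0:
--             return 0
--     return 1
-- ===== Notes on version B (the rewrite author's own statement) =====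
-- stated objective: simpler
-- what changed: Replaced the index loop with i % 3 branching by a single pass that consumes the list three elements at a time (nonzero, zero, nonzero per chunk), so no indices or modulo arithmetic remain.
import Mathlib
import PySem

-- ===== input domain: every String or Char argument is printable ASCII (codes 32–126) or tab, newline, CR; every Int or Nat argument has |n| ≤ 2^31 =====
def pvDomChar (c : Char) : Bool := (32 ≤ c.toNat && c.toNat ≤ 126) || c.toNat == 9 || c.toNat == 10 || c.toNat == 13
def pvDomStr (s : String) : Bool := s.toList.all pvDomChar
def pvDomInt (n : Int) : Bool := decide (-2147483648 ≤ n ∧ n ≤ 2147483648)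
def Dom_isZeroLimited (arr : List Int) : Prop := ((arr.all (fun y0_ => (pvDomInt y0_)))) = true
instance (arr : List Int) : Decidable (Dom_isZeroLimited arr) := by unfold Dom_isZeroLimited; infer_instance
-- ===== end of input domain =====

-- B replaces A's index/modulo loop by a three-at-a-time single pass; objective: simpler.

-- ===== PORT A =====
-- A's 'for i in range(len(arr))' loop with early returns: structural recursion over
-- the list carrying the index i (arr[i] is the head at each step).
def isZeroLimitedGoA : List Int → Nat → Int
  | [], _ => 1
  | x :: xs, i =>
    if i % 3 == 1 then
      if x ≠ 0 then 0 else isZeroLimitedGoA xs (i + 1)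
    else
      if x = 0 then 0 else isZeroLimitedGoA xs (i + 1)

def isZeroLimited (arr : List Int) : Int := isZeroLimitedGoA arr 0

-- ===== PORT B =====
-- Source B consumes the iterator three elements per outer iteration (x nonzero, y zero,
-- z nonzero, with defaults when exhausted): pattern-match recursion in chunks of 3.
def isZeroLimited_alt : List Int → Int
  | [] => 1
  | [x] => if x = 0 then 0 else 1
  | [x, y] => if x = 0 then 0 else if y ≠ 0 then 0 else 1
  | x :: y :: z :: rest =>
    if x = 0 then 0
    else if y ≠ 0 then 0
    else if z = 0 then 0
    else isZeroLimited_alt rest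

-- ===== PRECONDITION & SPEC =====
def Spec_isZeroLimited (arr : List Int) (out : Int) : Prop := out = isZeroLimited_alt arr
instance (arr : List Int) (out : Int) : Decidable (Spec_isZeroLimited arr out) := by unfold Spec_isZeroLimited; infer_instance

-- ===== CLAIM (what is proved, stated in full; the proofs are below) =====
def Claim_equal_isZeroLimited : Prop := ∀ (arr : List Int), Dom_isZeroLimited arr → Spec_isZeroLimited arr (isZeroLimited arr)

-- ===== LEMMAS AND PROOFS =====
-- A's loop state only matters modulo 3.
theorem isZeroLimitedGoA_mod (xs : List Int) : ∀ i j : Nat, i % 3 = j % 3 →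
    isZeroLimitedGoA xs i = isZeroLimitedGoA xs j := by
  induction xs with
  | nil => intro i j _; rfl
  | cons x xs ih =>
    intro i j h
    simp only [isZeroLimitedGoA, h]
    have : (i + 1) % 3 = (j + 1) % 3 := by omega
    rw [ih _ _ this]

theorem isZeroLimitedGoA_eq_alt : ∀ xs : List Int, isZeroLimitedGoA xs 0 = isZeroLimited_alt xs
  | [] => rfl
  | [x] => by simp [isZeroLimitedGoA, isZeroLimited_alt]
  | [x, y] => by
    simp only [isZeroLimitedGoA, isZeroLimited_alt]
    split_ifs <;> simp_all
  | x :: y :: z :: rest => by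
    simp only [isZeroLimitedGoA, isZeroLimited_alt]
    have h3 : isZeroLimitedGoA rest 3 = isZeroLimitedGoA rest 0 :=
      isZeroLimitedGoA_mod rest 3 0 rfl
    rw [h3, isZeroLimitedGoA_eq_alt rest]
    split_ifs <;> simp_all

-- ===== VERDICT (by name: the statement is the Claim_ definition above) =====
theorem isZeroLimited_spec : Claim_equal_isZeroLimited := by
  intro arr _
  unfold Spec_isZeroLimited isZeroLimited
  exact isZeroLimitedGoA_eq_alt arr
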